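-- pv_equiv track=rewrite | github.com/youssefabdelm/responseratevisualizer | schedulesngrams.py | checkifletters
-- ===== SOURCE A (Python) =====
-- def checkifletters(string):
--     total = 0
--     for letter in string.split(' '):
--         total+= len(letter)
--
--     if total == len(string.split(' ')):
--         return True
--     else:
--         return False
-- ===== SOURCE B (Python) =====
-- def checkifletters(string):
--     # every split part has length 1  <=>  len(string) == 2*len(parts) - 1,
--     # since splitting on the single char ' ' gives sum(len(p)) = len(string) - spaces
--     # and len(parts) = spaces + 1.
--     parts = string.split(' ')
--     return len(string) == 2 * len(parts) - 1
-- ===== Notes on version B (the rewrite author's own statement) =====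
-- stated objective: simpler
-- what changed: Replaces the loop summing the lengths of the split parts with a closed-form arithmetic identity: since the separator is the single character ' ', all parts have length 1 iff len(string) == 2*len(parts) - 1.
import Mathlib
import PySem

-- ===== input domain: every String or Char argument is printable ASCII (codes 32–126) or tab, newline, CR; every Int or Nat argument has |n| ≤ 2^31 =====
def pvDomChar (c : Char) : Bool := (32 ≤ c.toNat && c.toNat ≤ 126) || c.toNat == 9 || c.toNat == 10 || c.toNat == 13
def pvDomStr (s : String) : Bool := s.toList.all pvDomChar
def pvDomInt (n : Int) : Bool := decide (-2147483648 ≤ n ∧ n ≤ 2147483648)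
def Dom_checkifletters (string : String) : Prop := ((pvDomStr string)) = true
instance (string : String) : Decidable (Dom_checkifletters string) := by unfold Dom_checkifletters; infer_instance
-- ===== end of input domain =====

-- B replaces A's length-summing loop over the split parts with one arithmetic identity; objective: simpler.

-- ===== PORT A =====
-- string.split(' ') with the nonempty one-char separator never raises; ported via PySem.Chars.splitOn on code points (exact).
def checkifletters (string : String) : Bool :=
  let total : Int :=
    (PySem.Chars.splitOn string.toList [' ']).foldl (fun acc letter => acc + (letter.length : Int)) 0
  if total == ((PySem.Chars.splitOn string.toList [' ']).length : Int) then true else false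

-- ===== PORT B =====
def checkifletters_alt (string : String) : Bool :=
  let parts := PySem.Chars.splitOn string.toList [' ']
  decide ((string.toList.length : Int) = 2 * (parts.length : Int) - 1)

-- ===== PRECONDITION & SPEC =====
def Spec_checkifletters (string : String) (out : Bool) : Prop := out = checkifletters_alt string
instance (string : String) (out : Bool) : Decidable (Spec_checkifletters string out) := by unfold Spec_checkifletters; infer_instance

-- ===== CLAIM (what is proved, stated in full; the proofs are below) =====
def Claim_equal_checkifletters : Prop := ∀ (string : String), Dom_checkifletters string → Spec_checkifletters string (checkifletters string)

-- ===== LEMMAS AND PROOFS =====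

-- Invariant of splitOn's worker for a one-character separator: the number of parts
-- and the total length of the parts are determined by the count of the separator.
theorem splitOn_go_spec (c : Char) (fuel : Nat) :
    ∀ (l cur : List Char) (acc : List (List Char)), l.length ≤ fuel →
    (PySem.Chars.splitOn.go [c] fuel l cur acc).length = acc.length + l.count c + 1 ∧
    ((PySem.Chars.splitOn.go [c] fuel l cur acc).map List.length).sum + l.count c
      = (acc.map List.length).sum + cur.length + l.length := by
  induction fuel with
  | zero =>
    intro l cur acc h
    have hl : l = [] := List.eq_nil_of_length_eq_zero (Nat.le_zero.mp h)
    subst hl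
    simp [PySem.Chars.splitOn.go]
  | succ n ih =>
    intro l cur acc h
    cases l with
    | nil => simp [PySem.Chars.splitOn.go]
    | cons c' rest =>
      by_cases hc : c = c'
      · subst hc
        have hpre : [c].isPrefixOf (c :: rest) = true := by simp [List.isPrefixOf]
        have := ih rest [] ((cur.reverse :: acc)) (by simpa using Nat.lt_succ_iff.mp (by simpa using h))
        simp [PySem.Chars.splitOn.go, hpre] at this ⊢
        omega
      · have hpre : [c].isPrefixOf (c' :: rest) = false := by
          simp [List.isPrefixOf]; exact hc
        have hcc : (c' :: rest).count c = rest.count c := by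
          simp [List.count_cons]; exact Ne.symm hc
        have := ih rest (c' :: cur) acc (by simpa using Nat.lt_succ_iff.mp (by simpa using h))
        simp [PySem.Chars.splitOn.go, hpre, hcc] at this ⊢
        omega

theorem splitOn_spec (c : Char) (s : List Char) :
    (PySem.Chars.splitOn s [c]).length = s.count c + 1 ∧
    ((PySem.Chars.splitOn s [c]).map List.length).sum + s.count c = s.length := by
  have := splitOn_go_spec c (s.length + 1) s [] [] (by omega)
  simpa [PySem.Chars.splitOn] using this

theorem foldl_add_length (l : List (List Char)) (a : Int) :
    l.foldl (fun acc letter => acc + (letter.length : Int)) a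
      = a + ((l.map List.length).sum : Int) := by
  induction l generalizing a with
  | nil => simp
  | cons x xs ih => simp [ih]; ring

-- ===== VERDICT (by name: the statement is the Claim_ definition above) =====
theorem checkifletters_spec : Claim_equal_checkifletters := by
  intro s _
  unfold Spec_checkifletters checkifletters checkifletters_alt
  obtain ⟨hlen, hsum⟩ := splitOn_spec ' ' s.toList
  simp only [foldl_add_length, zero_add, beq_iff_eq]
  split_ifs with h
  · symm; simp only [decide_eq_true_eq]; rw [hlen] at h ⊢; omega
  · symm; simp only [decide_eq_false_iff_not]; rw [hlen] at h ⊢; omega
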